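-- pv_equiv track=rewrite | github.com/nrdgrrrl/primordial | primordial/graphical_benchmarking.py | _mode_or_mixed
-- ===== SOURCE A (Python) =====
-- def _mode_or_mixed(values: list[str]) -> str:
--     if not values:
--         return "unclear"
--     unique = sorted(set(values))
--     if len(unique) == 1:
--         return unique[0]
--     counts = {value: values.count(value) for value in unique}
--     top_value = max(counts.values())
--     top = [name for name, count in counts.items() if count == top_value]
--     if len(top) == 1:
--         return top[0]
--     return "mixed"
-- ===== SOURCE B (Python) =====
-- def _mode_or_mixed(values: list[str]) -> str:
--     if not values:
--         return "unclear"
--     counts = {}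
--     for v in values:
--         counts[v] = counts.get(v, 0) + 1
--     best = ""
--     best_count = 0
--     tie = False
--     for name, count in counts.items():
--         if count > best_count:
--             best, best_count, tie = name, count, False
--         elif count == best_count:
--             tie = True
--     return "mixed" if tie else best
-- ===== Notes on version B (the rewrite author's own statement) =====
-- stated objective: faster
-- what changed: Replaces A's sorted(set(values)) plus a values.count() pass per distinct value, max() and a filtering comprehension with a single hash-count pass over the list followed by one best/tie scan over the counts.
import Mathlib
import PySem

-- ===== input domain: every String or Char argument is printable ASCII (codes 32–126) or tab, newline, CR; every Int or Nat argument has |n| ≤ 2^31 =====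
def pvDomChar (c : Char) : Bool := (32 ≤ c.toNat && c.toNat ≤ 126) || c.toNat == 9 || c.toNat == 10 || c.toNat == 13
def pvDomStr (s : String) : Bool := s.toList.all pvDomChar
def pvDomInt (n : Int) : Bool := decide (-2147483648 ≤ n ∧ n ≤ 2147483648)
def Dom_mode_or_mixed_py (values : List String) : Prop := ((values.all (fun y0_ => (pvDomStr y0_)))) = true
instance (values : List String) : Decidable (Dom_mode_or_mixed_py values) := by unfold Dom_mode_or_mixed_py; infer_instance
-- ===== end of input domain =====

-- B replaces A's sort + per-unique-value values.count() + max + filter with a single hash-count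
-- pass followed by one best/tie scan over the counts (objective: faster, O(n) vs O(n·u + n log n)).

-- ===== PORT A =====
def mode_or_mixed_py (values : List String) : String :=
  if values = [] then "unclear"
  else
    let unique := PySem.List.sorted (PySem.Set.ofList values) id
    if unique.length = 1 then unique.headI
    else
      let counts : PySem.Dict String Int :=
        unique.foldl (fun d v => d.insert v ((PySem.List.count values v : Int))) PySem.Dict.empty
      -- max(counts.values()): counts is nonempty here (values ≠ []), so Python's max cannot raise
      let top_value : Int := (PySem.List.max? counts.values id).getD 0
      let top := (counts.items.filter (fun p => p.2 == top_value)).map (fun p => p.1)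
      if top.length = 1 then top.headI else "mixed"

-- ===== PORT B =====
-- one step of B's best/tie scan over (name, count) pairs
def altStep (st : String × Int × Bool) (p : String × Int) : String × Int × Bool :=
  if st.2.1 < p.2 then (p.1, p.2, false)
  else if p.2 = st.2.1 then (st.1, st.2.1, true)
  else st

def mode_or_mixed_py_alt (values : List String) : String :=
  if values = [] then "unclear"
  else
    let counts : PySem.Dict String Int :=
      values.foldl (fun d v => d.insert v (d.getD v 0 + 1)) PySem.Dict.empty
    let r := counts.items.foldl altStep ("", 0, false)
    if r.2.2 then "mixed" else r.1

-- ===== PRECONDITION & SPEC =====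
def Spec_mode_or_mixed_py (values : List String) (out : String) : Prop := out = mode_or_mixed_py_alt values
instance (values : List String) (out : String) : Decidable (Spec_mode_or_mixed_py values out) := by unfold Spec_mode_or_mixed_py; infer_instance

-- ===== CLAIM (what is proved, stated in full; the proofs are below) =====
def Claim_equal_mode_or_mixed_py : Prop := ∀ (values : List String), Dom_mode_or_mixed_py values → Spec_mode_or_mixed_py values (mode_or_mixed_py values)

-- ===== LEMMAS AND PROOFS =====

-- PySem's max? with the identity key computes List.max? on Int lists
lemma pyMax_eq_max? (xs : List Int) : PySem.List.max? xs id = xs.max? := by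
  cases xs with
  | nil => rfl
  | cons x xs =>
      simp only [PySem.List.max?, List.max?, List.foldl]
      induction xs generalizing x with
      | nil => rfl
      | cons y ys ih =>
          show List.foldl _ (if id x < id y then some y else some x) ys = some (List.foldl max (max x y) ys)
          by_cases h : id x < id y
          · rw [if_pos h]
            simp only [id_eq] at h
            rw [max_eq_right (le_of_lt h)]
            exact ih y
          · rw [if_neg h]
            simp only [id_eq] at h
            rw [max_eq_left (by omega)]
            exact ih x

lemma max?_perm {xs ys : List Int} (h : xs.Perm ys) : xs.max? = ys.max? := by
  cases hx : xs.max? with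
  | none =>
      rw [List.max?_eq_none_iff] at hx
      subst hx
      rw [List.max?_eq_none_iff.2 h.nil_eq.symm]
  | some m =>
      rw [List.max?_eq_some_iff] at hx
      exact (List.max?_eq_some_iff.2 ⟨h.mem_iff.1 hx.1, fun b hb => hx.2 b (h.mem_iff.2 hb)⟩).symm

-- characterisation of B's scan: best count = max, best value = first maximizer, tie flag = (≥ 2 maximizers)
lemma scan_char (L : List (String × Int)) (m : Int)
    (hm : (L.map Prod.snd).max? = some m) (hpos : ∀ p ∈ L, 0 < p.2) :
    L.foldl altStep ("", 0, false) =
      (((L.filter (fun p => p.2 == m)).headI).1, m,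
        decide (2 ≤ L.countP (fun p => p.2 == m))) := by
  induction L using List.reverseRecOn generalizing m with
  | nil => simp at hm
  | append_singleton L' p ih =>
      by_cases hL' : L' = []
      · subst hL'
        simp only [List.nil_append, List.map_cons, List.map_nil] at hm
        have hmp : m = p.2 := by
          simp [List.max?] at hm
          omega
        have hp : 0 < p.2 := hpos p (by simp)
        subst hmp
        simp [altStep, List.foldl, if_pos (show (0:Int) < p.2 from hp)]
      · -- L' nonempty: get its max m'
        obtain ⟨m', hm'⟩ : ∃ m', (L'.map Prod.snd).max? = some m' := by
          cases hx : (L'.map Prod.snd).max? with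
          | none => rw [List.max?_eq_none_iff, List.map_eq_nil_iff] at hx; exact absurd hx hL'
          | some a => exact ⟨a, rfl⟩
        have hx' := List.max?_eq_some_iff.1 hm'
        have ih' := ih m' hm' (fun q hq => hpos q (List.mem_append_left _ hq))
        rw [List.foldl_append, ih']
        simp only [List.foldl]
        -- characterize m
        rw [List.map_append, List.map_cons, List.map_nil] at hm
        have hmem' : ∃ q ∈ L', q.2 = m' := by
          obtain ⟨q, hq, hq2⟩ := List.mem_map.1 hx'.1
          exact ⟨q, hq, hq2⟩
        have hub' : ∀ q ∈ L', q.2 ≤ m' := fun q hq => hx'.2 q.2 (List.mem_map.2 ⟨q, hq, rfl⟩)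
        rcases lt_trichotomy m' p.2 with h | h | h
        · -- new strict max at p
          have hmp : m = p.2 := by
            have : (L'.map Prod.snd ++ [p.2]).max? = some p.2 :=
              List.max?_eq_some_iff.2 ⟨List.mem_append_right _ (List.mem_singleton.2 rfl),
                by
                  intro b hb
                  rcases List.mem_append.1 hb with hb | hb
                  · obtain ⟨q, hq, hq2⟩ := List.mem_map.1 hb
                    exact le_of_lt (lt_of_le_of_lt (hq2 ▸ hub' q hq) h)
                  · simp at hb; omega⟩
            rw [hm] at this; exact Option.some_inj.1 this
          subst hmp
          have hfilnil : L'.filter (fun q => q.2 == p.2) = [] := by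
            rw [List.filter_eq_nil_iff]
            intro q hq
            simp only [beq_iff_eq]
            have := hub' q hq; omega
          have hcnt : L'.countP (fun q => q.2 == p.2) = 0 := by
            rw [List.countP_eq_length_filter, hfilnil]
            rfl
          simp [altStep, if_pos h, List.filter_append, hfilnil, List.countP_append, hcnt]
        · -- tie at the max
          have hmp : m = m' := by
            have : (L'.map Prod.snd ++ [p.2]).max? = some m' :=
              List.max?_eq_some_iff.2 ⟨List.mem_append_left _ hx'.1,
                by
                  intro b hb
                  rcases List.mem_append.1 hb with hb | hb
                  · obtain ⟨q, hq, hq2⟩ := List.mem_map.1 hb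
                    exact hq2 ▸ hub' q hq
                  · simp at hb; omega⟩
            rw [hm] at this; exact Option.some_inj.1 this
          subst hmp
          have hcnt1 : 0 < L'.countP (fun q => q.2 == m) := by
            rw [List.countP_pos_iff]
            obtain ⟨q, hq, hq2⟩ := hmem'
            exact ⟨q, hq, by simp [hq2]⟩
          obtain ⟨q0, t0, hft⟩ : ∃ q0 t0, L'.filter (fun q => q.2 == m) = q0 :: t0 := by
            cases hf : L'.filter (fun q => q.2 == m) with
            | nil =>
                rw [List.countP_eq_length_filter, hf] at hcnt1
                simp at hcnt1
            | cons a b => exact ⟨a, b, rfl⟩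
          subst h
          simp [altStep, List.filter_append, hft, List.countP_append]
          obtain ⟨q, hq, hq2⟩ := hmem'
          exact ⟨q.1, by rw [← hq2]; simpa using hq⟩
        · -- p below the max
          have hmp : m = m' := by
            have : (L'.map Prod.snd ++ [p.2]).max? = some m' :=
              List.max?_eq_some_iff.2 ⟨List.mem_append_left _ hx'.1,
                by
                  intro b hb
                  rcases List.mem_append.1 hb with hb | hb
                  · obtain ⟨q, hq, hq2⟩ := List.mem_map.1 hb
                    exact hq2 ▸ hub' q hq
                  · simp at hb; omega⟩
            rw [hm] at this; exact Option.some_inj.1 this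
          subst hmp
          have hpf : (fun q : String × Int => q.2 == m) p = false := by
            simp only [beq_eq_false_iff_ne, ne_eq]
            omega
          simp [altStep, List.filter_append, List.countP_append, hpf,
            (show ¬ m < p.2 by omega), (show ¬ p.2 = m by omega)]

-- A and B agree on every nonempty input
lemma main_eq (values : List String) (hne : values ≠ []) :
    mode_or_mixed_py values = mode_or_mixed_py_alt values := by
  have hSperm : (PySem.List.sorted (PySem.Set.ofList values) id).Perm (PySem.Set.ofList values) :=
    PySem.List.sorted_perm _ id false
  set S := PySem.Set.ofList values with hS
  set unique := PySem.List.sorted S id with hUdef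
  have hSnodup : S.Nodup := PySem.Set.nodup_ofList values
  have hUnodup : unique.Nodup := hSperm.symm.nodup hSnodup
  have hmemS : ∀ v ∈ S, v ∈ values := fun v hv => (PySem.Set.mem_ofList values v).1 hv
  -- the (value, count) list both dicts hold, in their two orders
  set f : String → String × Int := fun v => (v, (List.count v values : Int)) with hf
  have hA : (unique.foldl (fun d v => d.insert v ((PySem.List.count values v : Int)))
      PySem.Dict.empty).items = unique.map f := by
    rw [PySem.Dict.items_foldl_insert_fresh unique (fun v => v) (fun v => (PySem.List.count values v : Int))
      PySem.Dict.empty (fun a _ => rfl) (by simpa using hUnodup)]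
    rfl
  have hB : (values.foldl (fun d v => d.insert v (d.getD v 0 + 1))
      (PySem.Dict.empty : PySem.Dict String Int)).items = S.map f := by
    rw [PySem.Dict.foldl_insert_getD_add_one_eq_counter values, PySem.Dict.items_counter values]
  have hperm : (unique.map f).Perm (S.map f) := hSperm.map f
  -- the max count m
  have hSne : S ≠ [] := by
    obtain ⟨w, ws, rfl⟩ : ∃ w ws, values = w :: ws := by
      cases values with
      | nil => exact absurd rfl hne
      | cons a l => exact ⟨a, l, rfl⟩
    intro h
    have : w ∈ S := (PySem.Set.mem_ofList _ _).2 (by simp)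
    rw [h] at this
    simp at this
  have hUne : unique ≠ [] := fun h => hSne (List.Perm.eq_nil ((h ▸ hSperm).symm))
  obtain ⟨m, hmA⟩ : ∃ m, ((unique.map f).map Prod.snd).max? = some m := by
    cases hx : ((unique.map f).map Prod.snd).max? with
    | none =>
        rw [List.max?_eq_none_iff, List.map_eq_nil_iff, List.map_eq_nil_iff] at hx
        exact absurd hx hUne
    | some a => exact ⟨a, rfl⟩
  have hmB : ((S.map f).map Prod.snd).max? = some m := by
    rw [← max?_perm (hperm.map Prod.snd), hmA]
  have hposB : ∀ p ∈ S.map f, 0 < p.2 := by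
    intro p hp
    obtain ⟨v, hv, rfl⟩ := List.mem_map.1 hp
    simpa [hf] using List.count_pos_iff.2 (hmemS v hv)
  -- B's value
  have hBval : mode_or_mixed_py_alt values =
      if (2 ≤ (S.map f).countP (fun p => p.2 == m) : Bool) then "mixed"
      else ((S.map f).filter (fun p => p.2 == m)).headI.1 := by
    simp only [mode_or_mixed_py_alt, if_neg hne, hB, scan_char (S.map f) m hmB hposB]
  have hcntpos : 1 ≤ (S.map f).countP (fun p => p.2 == m) := by
    have := (List.max?_eq_some_iff.1 hmB).1
    obtain ⟨p, hp, hp2⟩ := List.mem_map.1 this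
    exact List.countP_pos_iff.2 ⟨p, hp, by simp [hp2]⟩
  by_cases hU1 : unique.length = 1
  · -- A's early return: a single distinct value
    obtain ⟨u, hu⟩ := List.length_eq_one_iff.1 hU1
    have hSu : S = [u] := List.Perm.eq_singleton (hu ▸ hSperm.symm)
    have hAval : mode_or_mixed_py values = u := by
      simp only [mode_or_mixed_py, if_neg hne, ← hS, ← hUdef, hu]
      simp
    have hm' : m = (List.count u values : Int) := by
      rw [hSu] at hmB
      simp [hf, List.max?] at hmB
      omega
    rw [hAval, hBval, hSu]
    simp [hf, ← hm']
  · -- A's general path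
    have hvals : (List.foldl (fun d v => d.insert v ((PySem.List.count values v : Int)))
        (PySem.Dict.empty : PySem.Dict String Int) unique).values
        = ((List.foldl (fun d v => d.insert v ((PySem.List.count values v : Int)))
        (PySem.Dict.empty : PySem.Dict String Int) unique).items).map Prod.snd := rfl
    have hAval : mode_or_mixed_py values =
        if (((unique.map f).filter (fun p => p.2 == m)).map (fun p => p.1)).length = 1
        then (((unique.map f).filter (fun p => p.2 == m)).map (fun p => p.1)).headI
        else "mixed" := by
      simp only [mode_or_mixed_py, if_neg hne, ← hS, ← hUdef, if_neg hU1, hvals, hA,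
        pyMax_eq_max?, hmA, Option.getD_some]
    have hcnt_eq : (unique.map f).countP (fun p => p.2 == m) = (S.map f).countP (fun p => p.2 == m) :=
      hperm.countP_congr (fun x _ => rfl)
    have hlenA : ((unique.map f).filter (fun p => p.2 == m)).length
        = (S.map f).countP (fun p => p.2 == m) := by
      rw [← List.countP_eq_length_filter, hcnt_eq]
    rw [hAval, hBval]
    by_cases h2 : 2 ≤ (S.map f).countP (fun p => p.2 == m)
    · rw [if_pos (decide_eq_true h2)]
      rw [if_neg (show ¬ ((List.map (fun p => p.1) (List.filter (fun p => p.2 == m)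
        (List.map f unique))).length = 1) by rw [List.length_map, hlenA]; omega)]
    · have h1 : (S.map f).countP (fun p => p.2 == m) = 1 := by omega
      rw [if_neg (show ¬ (decide (2 ≤ List.countP (fun p => p.2 == m) (List.map f S)) = true) by
        simp only [decide_eq_true_eq]; exact h2)]
      rw [if_pos (show (List.map (fun p => p.1) (List.filter (fun p => p.2 == m)
        (List.map f unique))).length = 1 by rw [List.length_map, hlenA, h1])]
      have hfp : ((unique.map f).filter (fun p => p.2 == m)).Perm
          ((S.map f).filter (fun p => p.2 == m)) := hperm.filter _
      obtain ⟨qA, hqA⟩ := List.length_eq_one_iff.1 (by rw [hlenA, h1])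
      obtain ⟨qB, hqB⟩ := List.length_eq_one_iff.1
        (show ((S.map f).filter (fun p => p.2 == m)).length = 1 by
          rw [← List.countP_eq_length_filter, h1])
      rw [hqA, hqB] at hfp
      have : qA = qB := by simpa using hfp
      rw [hqA, hqB, this]
      simp

-- ===== VERDICT (by name: the statement is the Claim_ definition above) =====
theorem mode_or_mixed_py_spec : Claim_equal_mode_or_mixed_py := by
  intro values _
  unfold Spec_mode_or_mixed_py
  by_cases h : values = []
  · subst h; rfl
  · exact main_eq values h
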